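-- pv_equiv track=rewrite | github.com/17prateek12/tone_analyzer | serviceapp/actionSuggestor.py | suggest_actions
-- ===== SOURCE A (Python) =====
-- ACTIONS = {
--     "ORDER_FOOD": "Order Food Online",
--     "FIND_RECIPE": "Find Food Recipes",
--     "ASK_HELP": "Ask for Help",
--     "SHARE_NEWS": "Share News with Friends and Family"
-- }
--
-- def suggest_actions(tone,intent):
--     suggestion = []
--     intent = intent.lower() if intent else ""
--     tone = tone.lower() if tone else ""
--
--     if any(word in intent for word in ['food', 'order', 'order food', 'deliver', 'delivery']):
--         suggestion.append({'action': 'ORDER_FOOD', 'display_text': ACTIONS['ORDER_FOOD']})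
--     elif any(word in intent for word in ['recipe', 'make', 'prepare', 'ingredients', 'instruction']):
--         suggestion.append({'action': 'FIND_RECIPE', 'display_text': ACTIONS['FIND_RECIPE']})
--     elif any(word in intent for word in ['question', 'help', '?', 'request', 'assistance', 'guidance']):
--         suggestion.append({'action': 'ASK_HELP', 'display_text': ACTIONS['ASK_HELP']})
--     elif tone in ['happy', 'joy']:
--         suggestion.append({'action': 'SHARE_NEWS', 'display_text': ACTIONS['SHARE_NEWS']})
--
--     return suggestion
-- ===== SOURCE B (Python) =====
-- ACTIONS = {
--     "ORDER_FOOD": "Order Food Online",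
--     "FIND_RECIPE": "Find Food Recipes",
--     "ASK_HELP": "Ask for Help",
--     "SHARE_NEWS": "Share News with Friends and Family"
-- }
--
-- # Priority order of the four actions (index = priority, lower wins).
-- PRIORITY = ["ORDER_FOOD", "FIND_RECIPE", "ASK_HELP", "SHARE_NEWS"]
--
-- # Keyword groups for the three intent-based actions, indexed like PRIORITY.
-- INTENT_GROUPS = [
--     ['food', 'order', 'order food', 'deliver', 'delivery'],
--     ['recipe', 'make', 'prepare', 'ingredients', 'instruction'],
--     ['question', 'help', '?', 'request', 'assistance', 'guidance'],
-- ]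
--
-- def suggest_actions(tone, intent):
--     intent = intent.lower() if intent else ""
--     tone = tone.lower() if tone else ""
--     # Aggregate ALL matching priorities (no early exit), then select the best one.
--     hits = [i for i, words in enumerate(INTENT_GROUPS)
--             if any(w in intent for w in words)]
--     if tone in ('happy', 'joy'):
--         hits.append(3)
--     if not hits:
--         return []
--     key = PRIORITY[min(hits)]
--     return [{'action': key, 'display_text': ACTIONS[key]}]
-- ===== Notes on version B (the rewrite author's own statement) =====
-- stated objective: alternative
-- what changed: Instead of A's short-circuiting if/elif chain that returns at the first matching rule, B evaluates all four match tests, aggregates the indices of every matching rule into a hits list, and selects the winner as PRIORITY[min(hits)] (empty hits -> []).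
import Mathlib
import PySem

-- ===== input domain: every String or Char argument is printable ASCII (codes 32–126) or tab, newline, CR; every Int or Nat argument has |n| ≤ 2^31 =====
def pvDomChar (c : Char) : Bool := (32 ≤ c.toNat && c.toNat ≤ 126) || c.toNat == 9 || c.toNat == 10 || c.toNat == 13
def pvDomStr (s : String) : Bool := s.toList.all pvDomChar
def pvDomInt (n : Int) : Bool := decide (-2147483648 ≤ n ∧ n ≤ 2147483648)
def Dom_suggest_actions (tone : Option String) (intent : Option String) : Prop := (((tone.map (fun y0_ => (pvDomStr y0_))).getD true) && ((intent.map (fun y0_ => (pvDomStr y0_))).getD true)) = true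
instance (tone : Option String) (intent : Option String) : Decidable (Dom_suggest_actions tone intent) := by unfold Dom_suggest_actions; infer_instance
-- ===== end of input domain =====

-- B replaces A's short-circuiting if/elif chain by aggregating all matching rule indices and selecting PRIORITY[min(hits)] (objective: alternative).


-- ===== PORT A =====
def pvACTIONS : PySem.Dict String String :=
  PySem.Dict.ofList [("ORDER_FOOD", "Order Food Online"), ("FIND_RECIPE", "Find Food Recipes"),
    ("ASK_HELP", "Ask for Help"), ("SHARE_NEWS", "Share News with Friends and Family")]

-- A's if/elif chain over the lowered tone/intent strings
def pvChainA (toneL intentL : String) : List (List (String × String)) :=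
  if ["food", "order", "order food", "deliver", "delivery"].any (fun w => PySem.Str.isIn w intentL) then
    [[("action", "ORDER_FOOD"), ("display_text", PySem.Dict.getD pvACTIONS "ORDER_FOOD" "")]]
  else if ["recipe", "make", "prepare", "ingredients", "instruction"].any (fun w => PySem.Str.isIn w intentL) then
    [[("action", "FIND_RECIPE"), ("display_text", PySem.Dict.getD pvACTIONS "FIND_RECIPE" "")]]
  else if ["question", "help", "?", "request", "assistance", "guidance"].any (fun w => PySem.Str.isIn w intentL) then
    [[("action", "ASK_HELP"), ("display_text", PySem.Dict.getD pvACTIONS "ASK_HELP" "")]]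
  else if ["happy", "joy"].contains toneL then
    [[("action", "SHARE_NEWS"), ("display_text", PySem.Dict.getD pvACTIONS "SHARE_NEWS" "")]]
  else []

def suggest_actions (tone : Option String) (intent : Option String) : List (List (String × String)) :=
  let intentL := match intent with
    | none => ""
    | some s => if s ≠ "" then PySem.Str.lower s else ""
  let toneL := match tone with
    | none => ""
    | some s => if s ≠ "" then PySem.Str.lower s else ""
  pvChainA toneL intentL

-- ===== PORT B =====
def pvPRIORITY : List String := ["ORDER_FOOD", "FIND_RECIPE", "ASK_HELP", "SHARE_NEWS"]

def pvINTENT_GROUPS : List (List String) :=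
  [["food", "order", "order food", "deliver", "delivery"],
   ["recipe", "make", "prepare", "ingredients", "instruction"],
   ["question", "help", "?", "request", "assistance", "guidance"]]

-- B: aggregate the indices of ALL matching rules (no early exit), then pick PRIORITY[min(hits)]
def pvAggB (toneL intentL : String) : List (List (String × String)) :=
  let hits := ((pvINTENT_GROUPS.zipIdx).filter
      (fun g => g.1.any (fun w => PySem.Str.isIn w intentL))).map (·.2)
  let hits := if ["happy", "joy"].contains toneL then hits ++ [3] else hits
  match hits.min? with
  | none => []
  | some m =>
    let key := pvPRIORITY.getD m ""
    [[("action", key), ("display_text", PySem.Dict.getD pvACTIONS key "")]]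

def suggest_actions_alt (tone : Option String) (intent : Option String) : List (List (String × String)) :=
  let intentL := match intent with
    | none => ""
    | some s => if s ≠ "" then PySem.Str.lower s else ""
  let toneL := match tone with
    | none => ""
    | some s => if s ≠ "" then PySem.Str.lower s else ""
  pvAggB toneL intentL

-- ===== PRECONDITION & SPEC =====
def Spec_suggest_actions (tone : Option String) (intent : Option String) (out : List (List (String × String))) : Prop := out = suggest_actions_alt tone intent
instance (tone : Option String) (intent : Option String) (out : List (List (String × String))) : Decidable (Spec_suggest_actions tone intent out) := by unfold Spec_suggest_actions; infer_instance

-- ===== CLAIM (what is proved, stated in full; the proofs are below) =====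
def Claim_equal_suggest_actions : Prop := ∀ (tone : Option String) (intent : Option String), Dom_suggest_actions tone intent → Spec_suggest_actions tone intent (suggest_actions tone intent)

-- ===== LEMMAS AND PROOFS =====
-- On any pair of lowered strings the first-match chain and the aggregate-then-min selection agree.
theorem pvChainA_eq_pvAggB (toneL intentL : String) : pvChainA toneL intentL = pvAggB toneL intentL := by
  by_cases h0 : (["food", "order", "order food", "deliver", "delivery"].any (fun w => PySem.Str.isIn w intentL)) = true <;>
  by_cases h1 : (["recipe", "make", "prepare", "ingredients", "instruction"].any (fun w => PySem.Str.isIn w intentL)) = true <;>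
  by_cases h2 : (["question", "help", "?", "request", "assistance", "guidance"].any (fun w => PySem.Str.isIn w intentL)) = true <;>
  by_cases h3 : (["happy", "joy"].contains toneL) = true <;>
  simp_all [pvChainA, pvAggB, pvINTENT_GROUPS, pvPRIORITY, List.zipIdx, List.min?]

-- ===== VERDICT (by name: the statement is the Claim_ definition above) =====
theorem suggest_actions_spec : Claim_equal_suggest_actions := by
  intro tone intent _
  show suggest_actions tone intent = suggest_actions_alt tone intent
  simp only [suggest_actions, suggest_actions_alt]
  exact pvChainA_eq_pvAggB _ _
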